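-- pv_equiv track=rewrite | github.com/GEEGABYTE1/WordRecommenderModel | synonyms.py | sort_dict_values
-- ===== SOURCE A (Python) =====
-- def sort_dict_values(dict):
--     values = sorted(dict.values(), reverse=True)
--     max_val = values[0]
--     for key in list(dict.keys()):
--         if dict[key] == max_val:
--             return key
--         else:
--             continue
-- ===== SOURCE B (Python) =====
-- def sort_dict_values(dict):
--     # First key attaining the maximum value: one running-max pass (Python's max
--     # returns the first extremal item), instead of sorting all values first.
--     return max(dict.items(), key=lambda item: item[1])[0]
-- ===== Notes on version B (the rewrite author's own statement) =====
-- stated objective: idiomatic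
-- what changed: B replaces A's sort-all-values-descending-then-rescan-the-dict with a single built-in max(items, key=value) pass returning the first maximal item's key.
import Mathlib
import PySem

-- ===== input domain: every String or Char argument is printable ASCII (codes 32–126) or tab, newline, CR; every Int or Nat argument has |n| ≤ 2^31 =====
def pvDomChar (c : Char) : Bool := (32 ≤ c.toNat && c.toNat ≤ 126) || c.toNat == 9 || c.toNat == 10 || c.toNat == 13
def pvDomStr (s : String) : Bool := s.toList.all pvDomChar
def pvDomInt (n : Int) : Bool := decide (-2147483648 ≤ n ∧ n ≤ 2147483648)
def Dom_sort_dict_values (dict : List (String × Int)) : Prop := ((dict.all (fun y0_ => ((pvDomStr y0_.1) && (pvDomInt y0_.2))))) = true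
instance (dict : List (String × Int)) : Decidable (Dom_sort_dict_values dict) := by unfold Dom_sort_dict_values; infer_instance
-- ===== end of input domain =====

-- B replaces A's "sort all values descending, then rescan the dict for the first key
-- holding the top value" with a single running-maximum pass (max with a value key,
-- which keeps the first maximal item). Equivalence of the RETURN value is proved on
-- non-empty dicts (A raises IndexError on the empty dict).

-- ===== PORT A =====
-- 'for key in list(dict.keys()): if dict[key] == max_val: return key'
-- dict[key] on a dict with unique keys (Pre_ demands Nodup keys) is List.lookup.
def pyFindKey (dict : List (String × Int)) (maxv : Int) : List String → Option String
  | [] => none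
  | k :: ks => if dict.lookup k == some maxv then some k else pyFindKey dict maxv ks

def sort_dict_values (dict : List (String × Int)) : String :=
  let values := dict.map Prod.snd
  let sortedv := PySem.List.sorted values (fun x => x) true
  match PySem.List.pyGet? sortedv 0 with
  | none => ""   -- Python: values[0] raises IndexError (empty dict); excluded by Pre_
  | some maxv =>
    -- the Python loop returns None only if no key matches; unreachable since maxv is a value
    (pyFindKey dict maxv (dict.map Prod.fst)).getD ""

-- ===== PORT B =====
def sort_dict_values_alt (dict : List (String × Int)) : String :=
  match PySem.List.max? dict (fun item => item.2) with
  | some item => item.1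
  | none => ""   -- Python: max(()) raises ValueError (empty dict); excluded by Pre_

-- ===== PRECONDITION & SPEC =====
-- Pre_ excludes the empty dict (both A and B raise there) and association lists with
-- duplicate keys, which do not denote a Python dict (dict construction collapses them,
-- so the list-level ports cannot be compared with the Python programs there).
def Pre_sort_dict_values (dict : List (String × Int)) : Prop :=
  dict ≠ [] ∧ (dict.map Prod.fst).Nodup
instance (dict : List (String × Int)) : Decidable (Pre_sort_dict_values dict) := by
  unfold Pre_sort_dict_values; infer_instance

def pvWitness_sort_dict_values : (List (String × Int)) := [("a", 1), ("b", 2)]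

def Spec_sort_dict_values (dict : List (String × Int)) (out : String) : Prop := out = sort_dict_values_alt dict
instance (dict : List (String × Int)) (out : String) : Decidable (Spec_sort_dict_values dict out) := by unfold Spec_sort_dict_values; infer_instance

-- ===== CLAIM (what is proved, stated in full; the proofs are below) =====
def Claim_equal_sort_dict_values : Prop := ∀ (dict : List (String × Int)), Dom_sort_dict_values dict → Pre_sort_dict_values dict → Spec_sort_dict_values dict (sort_dict_values dict)

-- ===== LEMMAS AND PROOFS =====

-- the running-max step of PySem.List.max? (with key = value) once the accumulator is set
def pvStep (m x : String × Int) : String × Int := if m.2 < x.2 then x else m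

lemma pvStep_val_le (t : List (String × Int)) (b : String × Int) :
    b.2 ≤ (t.foldl pvStep b).2 := by
  induction t generalizing b with
  | nil => simp
  | cons c t ih =>
    refine le_trans ?_ (ih (pvStep b c))
    simp only [pvStep]; split_ifs with h <;> omega

lemma pvMax?_cons (t : List (String × Int)) (b : String × Int) :
    PySem.List.max? (b :: t) (fun kv => kv.2) = some (t.foldl pvStep b) := by
  induction t generalizing b with
  | nil => rfl
  | cons c t ih =>
    have h1 : PySem.List.max? (b :: c :: t) (fun kv : String × Int => kv.2)
        = PySem.List.max? (pvStep b c :: t) (fun kv => kv.2) := by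
      show List.foldl _ (if b.2 < c.2 then some c else some b) t
          = List.foldl _ (some (pvStep b c)) t
      rw [show (if b.2 < c.2 then some c else some b) = some (pvStep b c) by
        unfold pvStep; split <;> rfl]
    rw [h1, ih, List.foldl_cons]

-- the running max is the FIRST item attaining its value
lemma pvRun_find (t : List (String × Int)) (b : String × Int) :
    (b :: t).find? (fun kv => kv.2 == (t.foldl pvStep b).2) = some (t.foldl pvStep b) := by
  induction t generalizing b with
  | nil => simp
  | cons c t ih =>
    have hfold : (c :: t).foldl pvStep b = t.foldl pvStep (pvStep b c) := by
      simp [List.foldl_cons]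
    rw [hfold]
    by_cases h : b.2 < c.2
    · have hb' : pvStep b c = c := by simp [pvStep, h]
      have hble : c.2 ≤ (t.foldl pvStep (pvStep b c)).2 := by
        simpa [hb'] using pvStep_val_le t (pvStep b c)
      have hbne : (b.2 == (t.foldl pvStep (pvStep b c)).2) = false := by
        simp; omega
      rw [List.find?_cons]
      simp only [hbne]
      simpa [hb'] using ih (pvStep b c)
    · have hb' : pvStep b c = b := by simp [pvStep, h]
      have hih := ih (pvStep b c)
      rw [hb'] at hih ⊢
      by_cases hbm : b.2 = (t.foldl pvStep b).2
      · have hA : (b :: c :: t).find? (fun kv => kv.2 == (t.foldl pvStep b).2) = some b := by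
          rw [List.find?_cons]; simp [hbm]
        have hB : (b :: t).find? (fun kv => kv.2 == (t.foldl pvStep b).2) = some b := by
          rw [List.find?_cons]; simp [hbm]
        rw [hB] at hih
        rw [hA, ← hih]
      · have hble : b.2 ≤ (t.foldl pvStep b).2 := pvStep_val_le t b
        have hcm : (c.2 == (t.foldl pvStep b).2) = false := by simp; omega
        have hbmf : (b.2 == (t.foldl pvStep b).2) = false := by simp [hbm]
        rw [List.find?_cons] at hih
        simp only [hbmf] at hih
        rw [List.find?_cons, List.find?_cons]
        simp only [hbmf, hcm]
        exact hih

lemma pvFind?_of_max? (l : List (String × Int)) (r : String × Int)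
    (h : PySem.List.max? l (fun kv => kv.2) = some r) :
    l.find? (fun kv => kv.2 == r.2) = some r := by
  cases l with
  | nil => simp [PySem.List.max?] at h
  | cons b t =>
    rw [pvMax?_cons] at h
    have hr : r = t.foldl pvStep b := by
      cases h; rfl
    subst hr
    exact pvRun_find t b

-- A's key loop equals find? over the pairs, given unique keys
lemma pvFindKey_eq (t : List (String × Int)) (d : List (String × Int)) (maxv : Int)
    (hnd : (t.map Prod.fst).Nodup)
    (hlk : ∀ k ∈ t.map Prod.fst, d.lookup k = t.lookup k) :
    pyFindKey d maxv (t.map Prod.fst) = (t.find? (fun kv => kv.2 == maxv)).map Prod.fst := by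
  induction t with
  | nil => simp [pyFindKey]
  | cons kv t ih =>
    obtain ⟨k, v⟩ := kv
    have hlkk : d.lookup k = some v := by
      have := hlk k (by simp)
      simpa [List.lookup] using this
    simp only [List.map_cons, pyFindKey, hlkk, List.find?_cons]
    by_cases hv : v = maxv
    · simp [hv]
    · have hvf : (v == maxv) = false := by simp [hv]
      simp only [hvf]
      have hne : (some v == some maxv) = false := by simp [hv]
      rw [hne]
      simp only [Bool.false_eq_true, if_false]
      rw [List.map_cons, List.nodup_cons] at hnd
      obtain ⟨hkni, hndt⟩ := hnd
      apply ih hndt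
      intro k' hk'
      have hkk' : k ≠ k' := fun heq => hkni (heq ▸ hk')
      have hke : (k' == k) = false := beq_eq_false_iff_ne.mpr (Ne.symm hkk')
      rw [hlk k' (by simp [hk'])]
      simp [List.lookup, hke]

-- ===== VERDICT (by name: the statement is the Claim_ definition above) =====
theorem sort_dict_values_spec : Claim_equal_sort_dict_values := by
  unfold Claim_equal_sort_dict_values
  intro dict _hdom hpre
  obtain ⟨hne, hnd⟩ := hpre
  unfold Spec_sort_dict_values
  -- B returns some maximal item r
  obtain ⟨r, hr⟩ : ∃ r, PySem.List.max? dict (fun kv => kv.2) = some r := by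
    cases hmx : PySem.List.max? dict (fun kv => kv.2) with
    | none => exact absurd ((PySem.List.max?_eq_none_iff _ _).mp hmx) hne
    | some r => exact ⟨r, rfl⟩
  have hrmem : r ∈ dict := PySem.List.max?_mem hr
  have hrmax : ∀ y ∈ dict, y.2 ≤ r.2 := PySem.List.max?_isMax hr
  -- A's sorted head is the same value
  have hvne : dict.map Prod.snd ≠ [] := by simp [hne]
  obtain ⟨m, t, hst⟩ : ∃ m t, PySem.List.sorted (dict.map Prod.snd) (fun x => x) true = m :: t := by
    cases hs : PySem.List.sorted (dict.map Prod.snd) (fun x => x) true with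
    | nil => exact absurd ((PySem.List.sorted_eq_nil_iff _ _ _).mp hs) hvne
    | cons m t => exact ⟨m, t, rfl⟩
  have hmmem : m ∈ dict.map Prod.snd := by
    rw [← PySem.List.mem_sorted (dict.map Prod.snd) (fun x => x) true, hst]; simp
  have hmmax : ∀ v ∈ dict.map Prod.snd, v ≤ m := by
    intro v hv; exact PySem.List.key_head_sorted_rev_ge (dict.map Prod.snd) (fun x => x) hst v hv
  have hmr : m = r.2 := by
    obtain ⟨kv, hkv, hkv2⟩ := List.mem_map.mp hmmem
    have h1 : m ≤ r.2 := hkv2 ▸ hrmax kv hkv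
    have h2 : r.2 ≤ m := hmmax r.2 (List.mem_map.mpr ⟨r, hrmem, rfl⟩)
    omega
  -- evaluate A
  have hget : PySem.List.pyGet? (PySem.List.sorted (dict.map Prod.snd) (fun x => x) true) 0 = some m := by
    rw [hst]; simp [PySem.List.pyGet?, PySem.List.pyIdx?]
  have hfind : dict.find? (fun kv => kv.2 == m) = some r := by
    rw [hmr]; exact pvFind?_of_max? dict r hr
  have hA : sort_dict_values dict = r.1 := by
    unfold sort_dict_values
    simp only [hget]
    rw [pvFindKey_eq dict dict m hnd (fun k _ => rfl), hfind]
    rfl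
  have hB : sort_dict_values_alt dict = r.1 := by
    unfold sort_dict_values_alt
    rw [hr]
  rw [hA, hB]
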